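-- pv_equiv track=rewrite | github.com/rijndae1/My-CryptoPals-Solutions | Set 1/detectSingleByteXOR.py | str_score
-- ===== SOURCE A (Python) =====
-- def str_score(decrypted):
-- 	score = 0
-- 	letter_scores = {
--     'e': 10,
--     't': 9,
--     'a': 8,
--     'o': 7,
--     'i': 6,
--     'n': 5,
--     's': 4,
--     'r': 3,
--     'h': 2,
--     'd': 1,
-- 	}
--
-- 	for i in decrypted:
-- 		if i in letter_scores:
-- 			score += letter_scores[i]
--
-- 	return score
-- ===== SOURCE B (Python) =====
-- def str_score(decrypted):
-- 	letter_scores = {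
--     'e': 10,
--     't': 9,
--     'a': 8,
--     'o': 7,
--     'i': 6,
--     'n': 5,
--     's': 4,
--     'r': 3,
--     'h': 2,
--     'd': 1,
-- 	}
-- 	counts = {}
-- 	for ch in decrypted:
-- 		counts[ch] = counts.get(ch, 0) + 1
-- 	return sum(letter_scores.get(ch, 0) * n for ch, n in counts.items())
-- ===== Notes on version B (the rewrite author's own statement) =====
-- stated objective: idiomatic
-- what changed: B builds a character frequency table in one pass and then aggregates score*count over the table's distinct characters, instead of A's per-character membership test and score lookup in the scoring dict.
import Mathlib
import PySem

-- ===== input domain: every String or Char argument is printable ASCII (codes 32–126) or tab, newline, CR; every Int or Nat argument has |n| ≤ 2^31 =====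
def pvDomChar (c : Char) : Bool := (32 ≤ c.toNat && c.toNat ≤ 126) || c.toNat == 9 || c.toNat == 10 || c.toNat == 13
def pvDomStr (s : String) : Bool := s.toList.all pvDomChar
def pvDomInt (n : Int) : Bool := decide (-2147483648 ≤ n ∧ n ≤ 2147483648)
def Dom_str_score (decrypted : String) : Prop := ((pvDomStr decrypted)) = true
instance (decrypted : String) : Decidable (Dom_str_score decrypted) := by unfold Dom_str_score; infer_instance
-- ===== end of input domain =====

-- B replaces A's per-character membership-test-and-add loop by a one-pass character
-- frequency table followed by an aggregation of score*count over its distinct keys (idiomatic).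

-- ===== PORT A =====
def pvScoresA : PySem.Dict Char Int :=
  PySem.Dict.ofList
    [('e', 10), ('t', 9), ('a', 8), ('o', 7), ('i', 6),
     ('n', 5), ('s', 4), ('r', 3), ('h', 2), ('d', 1)]

def str_score (decrypted : String) : Int :=
  decrypted.toList.foldl
    (fun score i =>
      if pvScoresA.contains i then score + (pvScoresA.get? i).getD 0 else score)
    0

-- ===== PORT B =====
-- (B's letter_scores dict is the same literal; the shared constant pvScoresA is reused)
def str_score_alt (decrypted : String) : Int :=
  let counts :=
    decrypted.toList.foldl (fun d ch => d.insert ch (d.getD ch 0 + 1)) PySem.Dict.empty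
  (counts.items.map (fun p => pvScoresA.getD p.1 0 * p.2)).sum

-- ===== PRECONDITION & SPEC =====
def Spec_str_score (decrypted : String) (out : Int) : Prop := out = str_score_alt decrypted
instance (decrypted : String) (out : Int) : Decidable (Spec_str_score decrypted out) := by unfold Spec_str_score; infer_instance

-- ===== CLAIM (what is proved, stated in full; the proofs are below) =====
def Claim_equal_str_score : Prop := ∀ (decrypted : String), Dom_str_score decrypted → Spec_str_score decrypted (str_score decrypted)

-- ===== LEMMAS AND PROOFS =====

-- A's loop adds pvScoresA.getD i 0 at each character (0 when the key is absent).
theorem pvA_foldl (cs : List Char) (a : Int) :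
    cs.foldl
      (fun score i =>
        if pvScoresA.contains i then score + (pvScoresA.get? i).getD 0 else score) a
      = a + (cs.map (fun c => pvScoresA.getD c 0)).sum := by
  have hstep :
      (fun (score : Int) (i : Char) =>
        if pvScoresA.contains i then score + (pvScoresA.get? i).getD 0 else score)
      = fun score i => score + pvScoresA.getD i 0 := by
    funext s c
    by_cases h : pvScoresA.contains c
    · simp [h, PySem.Dict.getD_eq_get?_getD]
    · simp only [Bool.not_eq_true] at h
      simp [h, PySem.Dict.getD_of_not_contains (d := pvScoresA) (k := c) (d0 := (0:Int)) h]
  rw [hstep, PySem.List.foldl_add]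

-- grouping: summing f over cs equals summing f(k)*count(k) over the distinct elements of cs
theorem pvGroup (cs : List Char) (f : Char → Int) :
    ((PySem.Set.ofList cs).map (fun k => f k * cs.count k)).sum = (cs.map f).sum := by
  have hnd : (PySem.Set.ofList cs).Nodup := PySem.Set.nodup_ofList cs
  have hfin : (PySem.Set.ofList cs).toFinset = cs.toFinset := by
    ext x; simp [List.mem_toFinset, PySem.Set.mem_ofList]
  rw [← List.sum_toFinset _ hnd, hfin, Finset.sum_list_map_count]
  congr 1; funext m
  simp [mul_comm]

-- ===== VERDICT (by name: the statement is the Claim_ definition above) =====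
theorem str_score_spec : Claim_equal_str_score := by
  intro s _
  unfold Spec_str_score str_score str_score_alt
  rw [pvA_foldl]
  show _ = (((PySem.Dict.counter s.toList).items).map (fun p => pvScoresA.getD p.1 0 * p.2)).sum
  rw [PySem.Dict.items_counter, List.map_map,
      ← pvGroup s.toList (fun c => pvScoresA.getD c 0)]
  simp [Function.comp_def]
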